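-- pv_equiv track=rewrite | github.com/WillianJefferson/teste | Aula 5/Aula 5 - Tarefa_2.py | imprimir
-- ===== SOURCE A (Python) =====
-- def imprimir(numero):
--     parada_i = numero + 1
--     resposta = ''
--     for i in range(1, parada_i):
--         parada_j = i + 1
--         for j in range(1, parada_j):
--             resposta += str(j) + ' '
--         resposta += '\n'
--     return resposta
-- ===== SOURCE B (Python) =====
-- def imprimir(numero):
--     # Single pass: row i is row i-1 plus the next token, so keep a running row prefix.
--     resposta = ''
--     linha = ''
--     for i in range(1, numero + 1):
--         linha += str(i) + ' '
--         resposta += linha + '\n'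
--     return resposta
-- ===== Notes on version B (the rewrite author's own statement) =====
-- stated objective: alternative
-- what changed: Replaces the nested loops (rebuilding each row from scratch) with a single loop that maintains a running row-prefix string, since row i equals row i-1 plus one token.
import Mathlib
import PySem

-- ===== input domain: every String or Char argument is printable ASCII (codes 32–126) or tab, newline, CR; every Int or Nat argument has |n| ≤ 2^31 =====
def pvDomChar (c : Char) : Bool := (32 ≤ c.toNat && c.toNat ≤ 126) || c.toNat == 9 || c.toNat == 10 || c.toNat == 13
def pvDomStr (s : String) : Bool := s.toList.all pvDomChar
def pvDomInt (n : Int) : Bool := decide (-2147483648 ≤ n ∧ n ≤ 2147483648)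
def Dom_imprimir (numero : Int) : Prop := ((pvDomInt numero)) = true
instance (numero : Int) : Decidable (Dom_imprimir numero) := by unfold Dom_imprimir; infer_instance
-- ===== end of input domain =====

-- B replaces A's nested loops by one loop maintaining a running row-prefix string (alternative decomposition, same cost).

-- ===== PORT A =====
def imprimir (numero : Int) : String :=
  let parada_i := numero + 1
  (PySem.List.pyRange 1 parada_i 1).foldl
    (fun resposta i =>
      let parada_j := i + 1
      ((PySem.List.pyRange 1 parada_j 1).foldl
        (fun r j => r ++ PySem.Int.toStr j ++ " ") resposta) ++ "\n")
    ""

-- ===== PORT B =====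
def imprimir_alt (numero : Int) : String :=
  let st := (PySem.List.pyRange 1 (numero + 1) 1).foldl
    (fun (st : String × String) i =>
      let linha := st.2 ++ PySem.Int.toStr i ++ " "
      (st.1 ++ linha ++ "\n", linha))
    ("", "")
  st.1

-- ===== PRECONDITION & SPEC =====
def Spec_imprimir (numero : Int) (out : String) : Prop := out = imprimir_alt numero
instance (numero : Int) (out : String) : Decidable (Spec_imprimir numero out) := by unfold Spec_imprimir; infer_instance

-- ===== CLAIM (what is proved, stated in full; the proofs are below) =====
def Claim_equal_imprimir : Prop := ∀ (numero : Int), Dom_imprimir numero → Spec_imprimir numero (imprimir numero)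

-- ===== LEMMAS AND PROOFS =====

-- A's inner loop starting from s prepends s to the row built from "".
theorem innerFold_shift (l : List Int) (s : String) :
    l.foldl (fun r j => r ++ PySem.Int.toStr j ++ " ") s
      = s ++ l.foldl (fun r j => r ++ PySem.Int.toStr j ++ " ") "" := by
  induction l generalizing s with
  | nil => simp
  | cons x xs ih =>
    simp only [List.foldl_cons]
    rw [ih (s ++ PySem.Int.toStr x ++ " "), ih ("" ++ PySem.Int.toStr x ++ " ")]
    simp [String.append_assoc]

-- row n = A's inner loop result for i = n, built from ""
def rowStr (n : Int) : String :=
  (PySem.List.pyRange 1 (n + 1) 1).foldl (fun r j => r ++ PySem.Int.toStr j ++ " ") ""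

theorem main_inv (k : Nat) :
    (PySem.List.pyRange 1 ((k : Int) + 1) 1).foldl
      (fun resposta i =>
        ((PySem.List.pyRange 1 (i + 1) 1).foldl
          (fun r j => r ++ PySem.Int.toStr j ++ " ") resposta) ++ "\n") ""
    = ((PySem.List.pyRange 1 ((k : Int) + 1) 1).foldl
        (fun (st : String × String) i =>
          (st.1 ++ (st.2 ++ PySem.Int.toStr i ++ " ") ++ "\n",
           st.2 ++ PySem.Int.toStr i ++ " ")) ("", "")).1
    ∧ ((PySem.List.pyRange 1 ((k : Int) + 1) 1).foldl
        (fun (st : String × String) i =>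
          (st.1 ++ (st.2 ++ PySem.Int.toStr i ++ " ") ++ "\n",
           st.2 ++ PySem.Int.toStr i ++ " ")) ("", "")).2 = rowStr k := by
  induction k with
  | zero =>
    constructor <;> simp [PySem.List.pyRange_one_eq_nil, rowStr]
  | succ n ih =>
    have h1 : (1 : Int) ≤ (n : Int) + 1 := by omega
    have hsplit : PySem.List.pyRange 1 ((↑(n+1) : Int) + 1) 1
        = PySem.List.pyRange 1 ((n : Int) + 1) 1 ++ [(n : Int) + 1] := by
      have := PySem.List.pyRange_one_succ_right (a := 1) (b := (n : Int) + 1) h1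
      push_cast
      rw [show ((n : Int) + 1 + 1) = (((n : Int) + 1) + 1) by ring, this]
    rw [hsplit]
    simp only [List.foldl_append, List.foldl_cons, List.foldl_nil]
    obtain ⟨ihA, ihB⟩ := ih
    have hrow : rowStr ((n : Int) + 1) = rowStr n ++ PySem.Int.toStr ((n : Int) + 1) ++ " " := by
      unfold rowStr
      have := PySem.List.pyRange_one_succ_right (a := 1) (b := (n : Int) + 1) h1
      rw [show ((n : Int) + 1 + 1) = (((n : Int) + 1) + 1) by ring, this]
      simp [List.foldl_append]
    constructor
    · rw [ihA, ihB, innerFold_shift]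
      have : (PySem.List.pyRange 1 ((n:Int) + 1 + 1) 1).foldl
          (fun r j => r ++ PySem.Int.toStr j ++ " ") "" = rowStr ((n : Int) + 1) := by
        unfold rowStr; ring_nf
      rw [this, hrow]
    · rw [ihB]
      push_cast
      rw [hrow]

-- ===== VERDICT (by name: the statement is the Claim_ definition above) =====
theorem imprimir_spec : Claim_equal_imprimir := by
  intro numero _
  unfold Spec_imprimir imprimir imprimir_alt
  rcases le_or_gt numero 0 with h | h
  · have : PySem.List.pyRange 1 (numero + 1) 1 = [] :=
      PySem.List.pyRange_one_eq_nil (by omega)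
    simp [this]
  · obtain ⟨k, rfl⟩ : ∃ k : Nat, numero = (k : Int) :=
      ⟨numero.toNat, by omega⟩
    simpa using (main_inv k).1
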